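-- pv_equiv track=rewrite | github.com/salon64/adventofcode | 2025/day10/day10a.py | xor_vectors
-- ===== SOURCE A (Python) =====
-- def xor_vectors(vecs):
--     if not vecs:
--         return None
--     n = len(vecs[0])
--     out = [0] * n
--     for v in vecs:
--         for i in range(n):
--             out[i] ^= v[i]
--     return out
-- ===== SOURCE B (Python) =====
-- def xor_vectors(vecs):
--     if not vecs:
--         return None
--     n = len(vecs[0])
--
--     def xor_range(lo, hi):
--         # XOR-combine vecs[lo:hi] (nonempty) by splitting it in half.
--         if hi - lo == 1:
--             return [vecs[lo][i] for i in range(n)]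
--         mid = (lo + hi) // 2
--         left = xor_range(lo, mid)
--         right = xor_range(mid, hi)
--         return [left[i] ^ right[i] for i in range(n)]
--
--     return xor_range(0, len(vecs))
-- ===== Notes on version B (the rewrite author's own statement) =====
-- stated objective: alternative
-- what changed: Divide-and-conquer: recursively splits the list of vectors in half, XOR-combining the two halves' partial results, instead of A's single linear pass updating a preallocated accumulator in place.
import Mathlib
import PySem

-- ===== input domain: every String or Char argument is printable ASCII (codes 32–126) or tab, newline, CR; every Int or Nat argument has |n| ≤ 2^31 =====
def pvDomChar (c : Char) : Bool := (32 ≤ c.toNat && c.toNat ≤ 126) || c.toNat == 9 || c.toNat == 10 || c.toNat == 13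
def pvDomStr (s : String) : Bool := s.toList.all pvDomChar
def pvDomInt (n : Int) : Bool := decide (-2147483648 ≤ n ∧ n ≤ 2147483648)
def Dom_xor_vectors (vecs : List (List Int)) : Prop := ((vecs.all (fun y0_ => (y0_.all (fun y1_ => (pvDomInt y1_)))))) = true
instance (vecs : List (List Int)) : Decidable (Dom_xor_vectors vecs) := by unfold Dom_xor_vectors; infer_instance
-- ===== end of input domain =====

-- B replaces A's single linear pass (in-place accumulator updated per vector) by a
-- divide-and-conquer recursion that splits the vector list in half and XOR-combines
-- the halves' results; alternative decomposition, same asymptotic cost.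
-- Under Pre_ every indexed access is in range, so getD 0 is exact for Python's v[i]/out[i].

-- ===== PORT A =====
-- inner 'for i in range(n): out[i] ^= v[i]'
def pvStepA (n : Nat) (out v : List Int) : List Int :=
  (List.range n).foldl (fun o i => o.set i (PySem.Int.bxor (o.getD i 0) (v.getD i 0))) out

def xor_vectors (vecs : List (List Int)) : Option (List Int) :=
  match vecs with
  | [] => none
  | v0 :: _ =>
    let n := v0.length
    some (vecs.foldl (fun out v => pvStepA n out v) (List.replicate n 0))

-- ===== PORT B =====
-- 'xor_range(lo, hi)': recursive halving; the base test 'hi - lo == 1' is written as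
-- 'hi - lo ≤ 1' purely for Lean totality (the recursion never reaches hi - lo = 0,
-- exactly as in the Python).
def pvXorRange (vecs : List (List Int)) (n lo hi : Nat) : List Int :=
  if hi - lo ≤ 1 then
    (List.range n).map (fun i => (vecs.getD lo []).getD i 0)
  else
    let mid := (lo + hi) / 2
    let left := pvXorRange vecs n lo mid
    let right := pvXorRange vecs n mid hi
    (List.range n).map (fun i => PySem.Int.bxor (left.getD i 0) (right.getD i 0))
  termination_by hi - lo
  decreasing_by all_goals omega

def xor_vectors_alt (vecs : List (List Int)) : Option (List Int) :=
  match vecs with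
  | [] => none
  | v0 :: _ => some (pvXorRange vecs v0.length 0 vecs.length)

-- ===== PRECONDITION & SPEC =====
-- Pre_ excludes exactly the ragged inputs where Python A raises IndexError
-- (some vector shorter than vecs[0]); both Pythons raise there.
def Pre_xor_vectors (vecs : List (List Int)) : Prop :=
  ∀ v ∈ vecs, (vecs.headD []).length ≤ v.length

instance (vecs : List (List Int)) : Decidable (Pre_xor_vectors vecs) := by
  unfold Pre_xor_vectors; infer_instance

def pvWitness_xor_vectors : List (List Int) := [[1, 2], [3, 4], [5, 6]]

def Spec_xor_vectors (vecs : List (List Int)) (out : Option (List Int)) : Prop := out = xor_vectors_alt vecs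
instance (vecs : List (List Int)) (out : Option (List Int)) : Decidable (Spec_xor_vectors vecs out) := by unfold Spec_xor_vectors; infer_instance

-- ===== CLAIM (what is proved, stated in full; the proofs are below) =====
def Claim_equal_xor_vectors : Prop := ∀ (vecs : List (List Int)), Dom_xor_vectors vecs → Pre_xor_vectors vecs → Spec_xor_vectors vecs (xor_vectors vecs)

-- ===== LEMMAS AND PROOFS =====

-- encode an Int as (sign, magnitude) so that bxor acts componentwise
def pvEnc (a : Int) : Bool × Nat := if 0 ≤ a then (false, a.toNat) else (true, (-a - 1).toNat)
def pvDec (p : Bool × Nat) : Int := if p.1 then -(p.2 : Int) - 1 else (p.2 : Int)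

theorem pvEnc_dec (p : Bool × Nat) : pvEnc (pvDec p) = p := by
  obtain ⟨s, k⟩ := p
  unfold pvEnc pvDec
  cases s <;> simp <;> omega

theorem bxor_enc (a b : Int) :
    PySem.Int.bxor a b = pvDec (xor (pvEnc a).1 (pvEnc b).1, (pvEnc a).2 ^^^ (pvEnc b).2) := by
  unfold PySem.Int.bxor pvEnc
  split_ifs with h1 h2 h2 <;> simp [pvDec]

theorem bxor_assoc (a b c : Int) :
    PySem.Int.bxor (PySem.Int.bxor a b) c = PySem.Int.bxor a (PySem.Int.bxor b c) := by
  rw [bxor_enc a b, bxor_enc b c, bxor_enc _ c, bxor_enc a _, pvEnc_dec, pvEnc_dec]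
  simp [Nat.xor_assoc]

theorem zero_bxor (a : Int) : PySem.Int.bxor 0 a = a := by
  rw [PySem.Int.bxor_comm]; exact PySem.Int.bxor_zero a

-- column i of a list of vectors, as A's per-position accumulation
def pvColFold (i : Nat) (vs : List (List Int)) : Int :=
  vs.foldl (fun acc v => PySem.Int.bxor acc (v.getD i 0)) 0

theorem colFold_shift (i : Nat) (vs : List (List Int)) (a : Int) :
    vs.foldl (fun acc v => PySem.Int.bxor acc (v.getD i 0)) a = PySem.Int.bxor a (pvColFold i vs) := by
  induction vs generalizing a with
  | nil => simp [pvColFold, PySem.Int.bxor_zero]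
  | cons v vs ih =>
    simp only [pvColFold, List.foldl_cons]
    rw [ih, ih (PySem.Int.bxor 0 _), zero_bxor, bxor_assoc]

theorem colFold_append (i : Nat) (l1 l2 : List (List Int)) :
    pvColFold i (l1 ++ l2) = PySem.Int.bxor (pvColFold i l1) (pvColFold i l2) := by
  unfold pvColFold
  rw [List.foldl_append, colFold_shift]
  rfl

theorem getD_range_map (n i : Nat) (f : Nat → Int) (hi : i < n) :
    ((List.range n).map f).getD i 0 = f i := by
  rw [List.getD, List.getElem?_eq_getElem (by simpa using hi)]
  simp

-- the divide-and-conquer recursion computes the column folds of the segment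
theorem pvXorRange_eq (vecs : List (List Int)) (n : Nat) :
    ∀ (k lo hi : Nat), hi - lo = k → lo < hi →
      pvXorRange vecs n lo hi
        = (List.range n).map (fun i => pvColFold i ((vecs.drop lo).take (hi - lo))) := by
  intro k
  induction k using Nat.strong_induction_on with
  | _ k ih =>
    intro lo hi hk hlt
    rw [pvXorRange]
    by_cases hb : hi - lo ≤ 1
    · rw [if_pos hb]
      have h1 : hi - lo = 1 := by omega
      rw [h1]
      apply List.map_congr_left
      intro i _
      by_cases hlo : lo < vecs.length
      · have ht : (vecs.drop lo).take 1 = [vecs[lo]] := by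
          rw [List.drop_eq_getElem_cons hlo]
          rfl
        rw [ht]
        simp [pvColFold, List.getD_eq_getElem?_getD, List.getElem?_eq_getElem hlo, zero_bxor]
      · have hd : vecs.drop lo = [] := List.drop_eq_nil_of_le (by omega)
        have hnone : vecs[lo]? = none := List.getElem?_eq_none (by omega)
        rw [hd]
        simp [pvColFold, List.getD_eq_getElem?_getD, hnone]
    · rw [if_neg hb]
      simp only
      have hmid1 : lo < (lo + hi) / 2 := by omega
      have hmid2 : (lo + hi) / 2 < hi := by omega
      rw [ih ((lo + hi) / 2 - lo) (by omega) lo ((lo + hi) / 2) rfl hmid1,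
          ih (hi - (lo + hi) / 2) (by omega) ((lo + hi) / 2) hi rfl hmid2]
      apply List.map_congr_left
      intro i him
      have hin : i < n := List.mem_range.mp him
      rw [getD_range_map n i _ hin, getD_range_map n i _ hin]
      have hdd : (vecs.drop lo).drop ((lo + hi) / 2 - lo) = vecs.drop ((lo + hi) / 2) := by
        rw [List.drop_drop]
        congr 1
        omega
      have hsplit : (vecs.drop lo).take (hi - lo)
          = (vecs.drop lo).take ((lo + hi) / 2 - lo)
            ++ (vecs.drop ((lo + hi) / 2)).take (hi - (lo + hi) / 2) := by
        have hsum : hi - lo = ((lo + hi) / 2 - lo) + (hi - (lo + hi) / 2) := by omega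
        rw [hsum, List.take_add, hdd]
      rw [hsplit, colFold_append]

-- ===== A-side lemmas (pointwise characterisation of A's accumulator) =====

theorem pvStepA_length (n : Nat) (out v : List Int) : (pvStepA n out v).length = out.length := by
  unfold pvStepA
  induction (List.range n) generalizing out with
  | nil => rfl
  | cons i is ih => simpa using (ih (out.set i (PySem.Int.bxor (out.getD i 0) (v.getD i 0)))).trans (by simp)

theorem pvStepA_getD_ge (n : Nat) (out v : List Int) (i : Nat) (h : n ≤ i) :
    (pvStepA n out v).getD i 0 = out.getD i 0 := by
  unfold pvStepA
  induction n generalizing out with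
  | zero => rfl
  | succ m ih =>
    rw [List.range_succ, List.foldl_append]
    have hm : m ≤ i := Nat.le_of_succ_le h
    have hne : m ≠ i := by omega
    show ((pvStepA m out v).set m _).getD i 0 = out.getD i 0
    rw [List.getD, List.getD]
    rw [List.getElem?_set_ne hne]
    exact ih out hm

theorem pvStepA_getD_lt (n : Nat) (out v : List Int) (i : Nat) (hi : i < n) (hlen : n ≤ out.length) :
    (pvStepA n out v).getD i 0 = PySem.Int.bxor (out.getD i 0) (v.getD i 0) := by
  induction n generalizing out with
  | zero => omega
  | succ m ih =>
    have : pvStepA (m+1) out v = (pvStepA m out v).set m (PySem.Int.bxor ((pvStepA m out v).getD m 0) (v.getD m 0)) := by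
      unfold pvStepA; rw [List.range_succ, List.foldl_append]; rfl
    rw [this]
    rcases Nat.lt_or_ge i m with h | h
    · rw [List.getD, List.getD, List.getElem?_set_ne (by omega)]
      exact ih out h (by omega)
    · have him : i = m := by omega
      subst him
      have hlenm : i < (pvStepA i out v).length := by rw [pvStepA_length]; omega
      rw [List.getD, List.getElem?_set_self hlenm, Option.getD_some,
          pvStepA_getD_ge i out v i (le_refl i)]

theorem foldl_stepA_length (n : Nat) (vs : List (List Int)) (out : List Int) :
    (vs.foldl (fun o v => pvStepA n o v) out).length = out.length := by
  induction vs generalizing out with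
  | nil => rfl
  | cons v vs ih => simpa using (ih (pvStepA n out v)).trans (pvStepA_length n out v)

theorem foldl_stepA_getD (n : Nat) (vs : List (List Int)) (out : List Int) (i : Nat)
    (hi : i < n) (hlen : out.length = n) :
    (vs.foldl (fun o v => pvStepA n o v) out).getD i 0
      = vs.foldl (fun acc v => PySem.Int.bxor acc (v.getD i 0)) (out.getD i 0) := by
  induction vs generalizing out with
  | nil => rfl
  | cons v vs ih =>
    simp only [List.foldl_cons]
    rw [ih (pvStepA n out v) ((pvStepA_length n out v).trans hlen),
        pvStepA_getD_lt n out v i hi (le_of_eq hlen.symm)]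

-- ===== VERDICT (by name: the statement is the Claim_ definition above) =====
theorem xor_vectors_spec : Claim_equal_xor_vectors := by
  intro vecs _ _
  unfold Spec_xor_vectors
  match vecs with
  | [] => rfl
  | v0 :: vs =>
    unfold xor_vectors xor_vectors_alt
    simp only [Option.some.injEq]
    set n := v0.length with hn
    have hB := pvXorRange_eq (v0 :: vs) n (v0 :: vs).length 0 (v0 :: vs).length rfl (by simp)
    rw [hB]
    simp only [List.drop_zero, Nat.sub_zero, List.take_length]
    apply List.ext_getElem
    · rw [foldl_stepA_length, List.length_replicate, List.length_map, List.length_range]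
    · intro i h1 h2
      have hi : i < n := by rwa [List.length_map, List.length_range] at h2
      have hA := foldl_stepA_getD n (v0 :: vs) (List.replicate n 0) i hi (by simp)
      have hgA : ((v0 :: vs).foldl (fun o v => pvStepA n o v) (List.replicate n 0)).getD i 0
          = ((v0 :: vs).foldl (fun o v => pvStepA n o v) (List.replicate n 0))[i] := by
        rw [List.getD, List.getElem?_eq_getElem h1, Option.getD_some]
      rw [← hgA, hA]
      have : (List.replicate n (0 : Int)).getD i 0 = 0 := by
        rw [List.getD, List.getElem?_replicate_of_lt hi, Option.getD_some]
      rw [this]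
      have hR : ((List.range n).map (fun i => pvColFold i (v0 :: vs)))[i]
          = pvColFold i (v0 :: vs) := by simp
      rw [hR]
      rfl
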